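-- pv_equiv track=rewrite | github.com/Twitchhh3105/testdeloy | data/loaders/doc_loader.py | _detect_repeated_lines
-- ===== SOURCE A (Python) =====
-- from collections import Counter
--
-- def _detect_repeated_lines(pages: list[list[str]]) -> set[str]:
--     """Lines that appear on more than half of the pages = header/footer."""
--     if len(pages) < 3:
--         return set()
--     counts: Counter = Counter()
--     for lines in pages:
--         for line in set(lines):
--             counts[line] += 1
--     threshold = len(pages) // 2 + 1
--     return {line for line, c in counts.items() if c >= threshold}
-- ===== SOURCE B (Python) =====
-- def _detect_repeated_lines(pages: list[list[str]]) -> set[str]: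
--     """Lines that appear on more than half of the pages = header/footer."""
--     if len(pages) < 3:
--         return set()
--     candidates = set().union(*pages)
--     threshold = len(pages) // 2 + 1
--     page_sets = [set(page) for page in pages]
--     result = set()
--     for line in candidates:
--         count = 0
--         for page_set in page_sets:
--             if line in page_set:
--                 count += 1
--         if count >= threshold:
--             result.add(line)
--     return result
-- ===== Notes on version B (the rewrite author's own statement) =====
-- stated objective: alternative
-- what changed: Instead of building a Counter over per-page deduplicated lines in one indexing pass, B takes the union of all pages as candidates and counts, for each candidate, how many pages contain it by scanning the pages directly.
import Mathlib
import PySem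

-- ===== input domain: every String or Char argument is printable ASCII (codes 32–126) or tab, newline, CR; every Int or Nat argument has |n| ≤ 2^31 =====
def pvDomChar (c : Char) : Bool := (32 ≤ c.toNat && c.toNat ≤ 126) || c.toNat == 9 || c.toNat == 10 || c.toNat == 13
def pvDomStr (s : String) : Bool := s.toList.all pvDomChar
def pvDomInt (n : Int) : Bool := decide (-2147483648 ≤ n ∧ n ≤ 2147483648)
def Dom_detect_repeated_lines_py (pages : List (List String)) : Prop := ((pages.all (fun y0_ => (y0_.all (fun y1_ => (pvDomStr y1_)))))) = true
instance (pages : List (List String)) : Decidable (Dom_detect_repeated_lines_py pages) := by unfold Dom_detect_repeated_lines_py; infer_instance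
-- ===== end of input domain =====

-- B replaces A's single Counter-building pass with a candidates-union plus a per-candidate scan
-- over the pages (alternative decomposition, same results).


-- ===== PORT A =====
def detect_repeated_lines_py (pages : List (List String)) : List String :=
  if pages.length < 3 then PySem.Set.empty
  else
    let counts : PySem.Dict String Int :=
      pages.foldl (fun counts lines =>
        (PySem.Set.ofList lines).foldl (fun counts line => counts.modify line 0 (· + 1)) counts)
        PySem.Dict.empty
    let threshold : Int := PySem.Int.floordiv (pages.length : Int) 2 + 1
    counts.items.foldl
      (fun s p => if threshold ≤ p.2 then PySem.Set.add s p.1 else s) PySem.Set.empty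

-- ===== PORT B =====
def detect_repeated_lines_py_alt (pages : List (List String)) : List String :=
  if pages.length < 3 then PySem.Set.empty
  else
    let candidates : PySem.Set String :=
      pages.foldl (fun s page => PySem.Set.union s page) PySem.Set.empty
    let threshold : Int := PySem.Int.floordiv (pages.length : Int) 2 + 1
    let pageSets : List (PySem.Set String) := pages.map (fun page => PySem.Set.ofList page)
    candidates.foldl
      (fun s line =>
        if threshold ≤ pageSets.foldl (fun acc ps => if line ∈ ps then acc + 1 else acc) (0 : Int)
        then PySem.Set.add s line else s) PySem.Set.empty

-- ===== PRECONDITION & SPEC =====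
def Spec_detect_repeated_lines_py (pages : List (List String)) (out : List String) : Prop := out = detect_repeated_lines_py_alt pages
instance (pages : List (List String)) (out : List String) : Decidable (Spec_detect_repeated_lines_py pages out) := by unfold Spec_detect_repeated_lines_py; infer_instance

-- ===== CLAIM (what is proved, stated in full; the proofs are below) =====
def Claim_equal_detect_repeated_lines_py : Prop := ∀ (pages : List (List String)), Dom_detect_repeated_lines_py pages → Spec_detect_repeated_lines_py pages (detect_repeated_lines_py pages)

-- ===== LEMMAS AND PROOFS =====

-- A's nested counting loop is the Counter of the per-page-deduplicated flattening.
theorem countsA_eq_counter (pages : List (List String)) :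
    pages.foldl (fun counts lines =>
        (PySem.Set.ofList lines).foldl (fun counts line => counts.modify line 0 (· + 1)) counts)
        PySem.Dict.empty
      = PySem.Dict.counter (pages.flatMap (fun l => PySem.Set.ofList l)) := by
  rw [PySem.Dict.counter_eq_foldl]
  exact countsA_aux pages PySem.Dict.empty
where
  countsA_aux : ∀ (ps : List (List String)) (a : PySem.Dict String Int),
      ps.foldl (fun counts lines =>
        (PySem.Set.ofList lines).foldl (fun counts line => counts.modify line 0 (· + 1)) counts) a
      = (ps.flatMap (fun l => PySem.Set.ofList l)).foldl
          (fun d x => d.modify x 0 (· + 1)) a := by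
    intro ps
    induction ps with
    | nil => intro a; rfl
    | cons b r ih => intro a; simp only [List.foldl_cons, List.flatMap_cons, List.foldl_append, ih]

-- B's union loop deduplicates the plain flattening.
theorem candidatesB_eq_ofList (pages : List (List String)) :
    pages.foldl (fun s page => PySem.Set.union s page) PySem.Set.empty
      = PySem.Set.ofList (pages.flatMap id) := by
  have h : ∀ (ps : List (List String)) (s : PySem.Set String),
      ps.foldl (fun s page => PySem.Set.union s page) s = PySem.Set.update s (ps.flatMap id) := by
    intro ps
    induction ps with
    | nil => intro s; rfl
    | cons a r ih =>
        intro s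
        simp only [List.foldl_cons, List.flatMap_cons, id, PySem.Set.update_append]
        exact ih _
  simpa [PySem.Set.update_nil_left] using h pages PySem.Set.empty

-- Updating with a deduplicated list is updating with the list itself.
theorem update_ofList {s : PySem.Set String} (l : List String) :
    PySem.Set.update s (PySem.Set.ofList l) = PySem.Set.update s l := by
  rw [PySem.Set.update_eq_append_filter, PySem.Set.update_eq_append_filter,
    PySem.Set.ofList_ofList]

-- The two dedup orders coincide.
theorem ofList_flat_eq (pages : List (List String)) :
    PySem.Set.ofList (pages.flatMap (fun l => PySem.Set.ofList l))
      = PySem.Set.ofList (pages.flatMap id) := by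
  have h : ∀ (ps : List (List String)) (s : PySem.Set String),
      PySem.Set.update s (ps.flatMap (fun l => PySem.Set.ofList l))
        = PySem.Set.update s (ps.flatMap id) := by
    intro ps
    induction ps with
    | nil => intro s; rfl
    | cons a r ih =>
        intro s
        simp only [List.flatMap_cons, id, PySem.Set.update_append, update_ofList, ih]
  simpa [PySem.Set.update_nil_left] using h pages PySem.Set.empty

-- A's per-line count equals B's page scan.
theorem count_eq_scan (pages : List (List String)) (line : String) :
    ((pages.flatMap (fun l => PySem.Set.ofList l)).count line : Int)
      = (pages.map (fun page => PySem.Set.ofList page)).foldl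
          (fun acc ps => if line ∈ ps then acc + 1 else acc) (0 : Int) := by
  rw [List.foldl_map]
  have e : (fun (acc : Int) (page : List String) =>
        if line ∈ PySem.Set.ofList page then acc + 1 else acc)
      = (fun (acc : Int) (page : List String) =>
          if (decide (line ∈ page)) = true then acc + 1 else acc) := by
    funext acc page; simp [PySem.Set.mem_ofList]
  rw [e, PySem.List.foldl_count_if (fun page => decide (line ∈ page)) pages 0]
  have h : (pages.flatMap (fun l => PySem.Set.ofList l)).count line
      = pages.countP (fun page => decide (line ∈ page)) := by
    induction pages with
    | nil => rfl
    | cons a r ih =>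
        simp only [List.flatMap_cons, List.count_append, List.countP_cons, ih]
        by_cases hm : line ∈ a
        · rw [List.count_eq_one_of_mem (PySem.Set.nodup_ofList a)
            ((PySem.Set.mem_ofList _ _).2 hm)]
          simp [hm, Nat.add_comm]
        · rw [List.count_eq_zero_of_not_mem (fun hc => hm ((PySem.Set.mem_ofList _ _).1 hc))]
          simp [hm]
  simp [h]

-- B's filtering fold over a Nodup list of fresh elements appends the filter.
theorem foldl_add_filter (p : String → Prop) [DecidablePred p] :
    ∀ (ks : List String) (s : PySem.Set String), ks.Nodup → (∀ k ∈ ks, k ∉ s) →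
      ks.foldl (fun s k => if p k then PySem.Set.add s k else s) s
        = s ++ ks.filter (fun k => decide (p k)) := by
  intro ks
  induction ks with
  | nil => intro s _ _; simp
  | cons k r ih =>
      intro s hnd hdis
      simp only [List.foldl_cons, List.filter_cons]
      by_cases hp : p k
      · rw [if_pos hp, if_pos (by simpa using hp), PySem.Set.add_of_not_mem (hdis k (by simp))]
        rw [ih (s ++ [k]) hnd.of_cons]
        · simp
        · intro x hx
          simp only [List.mem_append, List.mem_singleton]
          rintro (h1 | h2)
          · exact hdis x (by simp [hx]) h1
          · exact (List.nodup_cons.1 hnd).1 (h2 ▸ hx)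
      · rw [if_neg hp, if_neg (by simpa using hp), ih s hnd.of_cons
          (fun x hx => hdis x (by simp [hx]))]

-- A's filtering fold over the Counter's items appends the filter on the keys.
theorem foldl_items_filter (thr : Int) (cnt : String → Int) :
    ∀ (ks : List String) (s : PySem.Set String), ks.Nodup → (∀ k ∈ ks, k ∉ s) →
      (ks.map (fun k => (k, cnt k))).foldl
          (fun s q => if thr ≤ q.2 then PySem.Set.add s q.1 else s) s
        = s ++ ks.filter (fun k => decide (thr ≤ cnt k)) := by
  intro ks
  induction ks with
  | nil => intro s _ _; simp
  | cons k r ih =>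
      intro s hnd hdis
      simp only [List.map_cons, List.foldl_cons, List.filter_cons]
      by_cases hp : thr ≤ cnt k
      · rw [if_pos hp, if_pos (by simpa using hp), PySem.Set.add_of_not_mem (hdis k (by simp))]
        rw [ih (s ++ [k]) hnd.of_cons]
        · simp
        · intro x hx
          simp only [List.mem_append, List.mem_singleton]
          rintro (h1 | h2)
          · exact hdis x (by simp [hx]) h1
          · exact (List.nodup_cons.1 hnd).1 (h2 ▸ hx)
      · rw [if_neg hp, if_neg (by simpa using hp), ih s hnd.of_cons
          (fun x hx => hdis x (by simp [hx]))]

-- ===== VERDICT (by name: the statement is the Claim_ definition above) =====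
theorem detect_repeated_lines_py_spec : Claim_equal_detect_repeated_lines_py := by
  intro pages _
  unfold Spec_detect_repeated_lines_py detect_repeated_lines_py detect_repeated_lines_py_alt
  by_cases h3 : pages.length < 3
  · simp [h3]
  · simp only [h3, if_false]
    rw [countsA_eq_counter, PySem.Dict.items_counter, candidatesB_eq_ofList, ← ofList_flat_eq]
    rw [foldl_items_filter (PySem.Int.floordiv (pages.length : Int) 2 + 1)
        (fun k => ((pages.flatMap (fun l => PySem.Set.ofList l)).count k : Int))
        (PySem.Set.ofList (pages.flatMap (fun l => PySem.Set.ofList l))) PySem.Set.empty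
        (PySem.Set.nodup_ofList _) (by simp [PySem.Set.empty]),
      foldl_add_filter (fun line => PySem.Int.floordiv (pages.length : Int) 2 + 1 ≤
          (pages.map (fun page => PySem.Set.ofList page)).foldl
            (fun acc ps => if line ∈ ps then acc + 1 else acc) (0 : Int))
        (PySem.Set.ofList (pages.flatMap (fun l => PySem.Set.ofList l))) PySem.Set.empty
        (PySem.Set.nodup_ofList _) (by simp [PySem.Set.empty])]
    simp only [PySem.Set.empty, List.nil_append]
    exact List.filter_congr (fun k _ => by simp [count_eq_scan pages k])
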